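-- pv_equiv track=rewrite | github.com/aria1th/Torus-Hamilton-Decomposition | scripts/torus_nd_d5_m3_formula_support_107.py | _event_class
-- ===== SOURCE A (Python) =====
-- from typing import Dict, List, Mapping, Sequence, Tuple
--
-- def _event_class(dn: Sequence[int]) -> str:
--     dn_tuple = tuple(int(value) for value in dn)
--     if dn_tuple == (0, 0, 0, 1):
--         return "flat"
--     if dn_tuple == (0, 0, 0, 0):
--         return "wrap"
--     if dn_tuple == (1, 1, 0, 0):
--         return "carry_jump"
--     if dn_tuple == (1, 0, 0, 0):
--         return "other_1000"
--     if dn_tuple == (0, 0, 1, 0):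
--         return "other_0010"
--     return "other"
-- ===== SOURCE B (Python) =====
-- # Trie of known event patterns: descend one element at a time instead of
-- # comparing the whole tuple against each key.
-- _TRIE = {
--     0: {0: {0: {0: "wrap", 1: "flat"},
--             1: {0: "other_0010"}}},
--     1: {0: {0: {0: "other_1000"}},
--         1: {0: {0: "carry_jump"}}},
-- }
--
-- def _event_class(dn):
--     node = _TRIE
--     for value in dn:
--         if not isinstance(node, dict):
--             return "other"
--         node = node.get(int(value))
--         if node is None:
--             return "other"
--     return node if isinstance(node, str) else "other"
-- ===== Notes on version B (the rewrite author's own statement) =====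
-- stated objective: alternative
-- what changed: A's chain of whole-tuple equality tests is replaced by an incremental walk down a prefix trie of the known patterns, consuming one element per step and short-circuiting to 'other' on the first missing branch, surplus element, or non-leaf end.
import Mathlib
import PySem

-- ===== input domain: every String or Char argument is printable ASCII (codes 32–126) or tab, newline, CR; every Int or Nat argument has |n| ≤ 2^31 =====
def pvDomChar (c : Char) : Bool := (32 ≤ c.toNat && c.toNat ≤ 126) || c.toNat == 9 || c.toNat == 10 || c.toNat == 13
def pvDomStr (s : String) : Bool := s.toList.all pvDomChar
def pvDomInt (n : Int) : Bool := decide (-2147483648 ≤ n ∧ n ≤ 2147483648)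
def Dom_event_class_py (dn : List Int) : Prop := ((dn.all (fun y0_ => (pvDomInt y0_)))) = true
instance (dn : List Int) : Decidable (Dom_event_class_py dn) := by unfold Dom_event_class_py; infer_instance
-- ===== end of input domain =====

-- B replaces A's chain of whole-tuple comparisons with a one-element-at-a-time walk
-- down a prefix trie of the known patterns (alternative decomposition, same cost).

-- ===== PORT A =====
-- A's if-chain of tuple comparisons, in order (a length-n Python tuple of ints ↦ List Int).
def event_class_py (dn : List Int) : String :=
  if dn = [0, 0, 0, 1] then "flat"
  else if dn = [0, 0, 0, 0] then "wrap"
  else if dn = [1, 1, 0, 0] then "carry_jump"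
  else if dn = [1, 0, 0, 0] then "other_1000"
  else if dn = [0, 0, 1, 0] then "other_0010"
  else "other"

-- ===== PORT B =====
-- Source B's nested dicts (string leaves or dict nodes) as a mutual inductive pair;
-- TrieKids keeps the dict's entries in insertion order.
mutual
inductive Trie where
  | str : String → Trie
  | dict : TrieKids → Trie
deriving Repr

inductive TrieKids where
  | nil : TrieKids
  | cons : Int → Trie → TrieKids → TrieKids
deriving Repr
end

-- dict.get on a trie node's children (first matching key, none if absent)
def trieGet : TrieKids → Int → Option Trie
  | .nil, _ => none
  | .cons k n rest, v => if v = k then some n else trieGet rest v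

-- the module-level _TRIE of Source B
def eventTrie : Trie :=
  .dict (.cons 0
    (.dict (.cons 0
      (.dict (.cons 0 (.dict (.cons 0 (.str "wrap") (.cons 1 (.str "flat") .nil)))
        (.cons 1 (.dict (.cons 0 (.str "other_0010") .nil)) .nil))) .nil))
  (.cons 1
    (.dict (.cons 0 (.dict (.cons 0 (.dict (.cons 0 (.str "other_1000") .nil)) .nil))
      (.cons 1 (.dict (.cons 0 (.dict (.cons 0 (.str "carry_jump") .nil)) .nil)) .nil))) .nil))

-- Source B's loop: descend one element per step; "other" on a string node with input left,
-- a missing child, or a dict node when the input is exhausted.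
def trieWalk : Trie → List Int → String
  | n, [] => match n with | .str s => s | .dict _ => "other"
  | .str _, _ :: _ => "other"
  | .dict ch, v :: rest =>
    match trieGet ch v with
    | none => "other"
    | some n' => trieWalk n' rest

def event_class_py_alt (dn : List Int) : String := trieWalk eventTrie dn

-- ===== PRECONDITION & SPEC =====
def Spec_event_class_py (dn : List Int) (out : String) : Prop := out = event_class_py_alt dn
instance (dn : List Int) (out : String) : Decidable (Spec_event_class_py dn out) := by unfold Spec_event_class_py; infer_instance

-- ===== CLAIM (what is proved, stated in full; the proofs are below) =====
def Claim_equal_event_class_py : Prop := ∀ (dn : List Int), Dom_event_class_py dn → Spec_event_class_py dn (event_class_py dn)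

-- ===== LEMMAS AND PROOFS =====

-- ===== VERDICT (by name: the statement is the Claim_ definition above) =====
set_option maxHeartbeats 2000000 in
theorem event_class_py_spec : Claim_equal_event_class_py := by
  intro dn _
  unfold Spec_event_class_py event_class_py event_class_py_alt eventTrie
  match dn with
  | [] => decide
  | [a] =>
    by_cases h0 : a = 0 <;> by_cases h1 : a = 1 <;>
      simp_all [trieWalk, trieGet]
  | [a, b] =>
    by_cases ha0 : a = 0 <;> by_cases ha1 : a = 1 <;>
    by_cases hb0 : b = 0 <;> by_cases hb1 : b = 1 <;>
      simp_all [trieWalk, trieGet]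
  | [a, b, c] =>
    by_cases ha0 : a = 0 <;> by_cases ha1 : a = 1 <;>
    by_cases hb0 : b = 0 <;> by_cases hb1 : b = 1 <;>
    by_cases hc0 : c = 0 <;> by_cases hc1 : c = 1 <;>
      simp_all [trieWalk, trieGet]
  | [a, b, c, d] =>
    by_cases ha0 : a = 0 <;> by_cases ha1 : a = 1 <;>
    by_cases hb0 : b = 0 <;> by_cases hb1 : b = 1 <;>
    by_cases hc0 : c = 0 <;> by_cases hc1 : c = 1 <;>
    by_cases hd0 : d = 0 <;> by_cases hd1 : d = 1 <;>
      simp_all [trieWalk, trieGet]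
  | a :: b :: c :: d :: e :: rest =>
    by_cases ha0 : a = 0 <;> by_cases ha1 : a = 1 <;>
    by_cases hb0 : b = 0 <;> by_cases hb1 : b = 1 <;>
    by_cases hc0 : c = 0 <;> by_cases hc1 : c = 1 <;>
    by_cases hd0 : d = 0 <;> by_cases hd1 : d = 1 <;>
      simp_all [trieWalk, trieGet]
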